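-- pv_equiv track=rewrite | github.com/causalNLP/amr_llm | code/get_features.py | bow_diff
-- ===== SOURCE A (Python) =====
-- def bow_diff(s1, s2):
--   l1 = s1.split(" ")
--   l2 = s2.split(" ")
--   for i in range(0, len(l1)):
--       for j in range(0, len(l2)):
--           if l1[i] == l2[j]:
--               l1[i] = 'damn'
--               l2[j] = 'damn'
--   l3 = []
--   for item in l1:
--       if item!='damn':
--           l3.append(item)
--   return len(l3)
-- ===== SOURCE B (Python) =====
-- def bow_diff(s1, s2):
--     counts = {}
--     for w in s2.split(" "):
--         counts[w] = counts.get(w, 0) + 1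
--     unmatched = 0
--     for w in s1.split(" "):
--         c = counts.get(w, 0)
--         if c > 0:
--             counts[w] = c - 1
--         else:
--             unmatched += 1
--     return unmatched
-- ===== Notes on version B (the rewrite author's own statement) =====
-- stated objective: alternative
-- what changed: Replaces the O(n*m) nested in-place marker loops with a multiset counter over s2's tokens consumed in one linear pass over s1's tokens; asymptotically O(n+m) but not measurably faster on the generated inputs.
-- intended difference: On inputs where the token 'damn' occurs more often among s1.split(' ') than among s2.split(' '), A silently treats the excess 'damn' words of s1 as matched (its in-place sentinel string collides with the real token) and returns a count lower by that excess, while B counts them as unmatched, the intended multiset-difference value. — e.g. on bow_diff("damn", "a"): A returns 0, B returns 1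
import Mathlib
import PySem

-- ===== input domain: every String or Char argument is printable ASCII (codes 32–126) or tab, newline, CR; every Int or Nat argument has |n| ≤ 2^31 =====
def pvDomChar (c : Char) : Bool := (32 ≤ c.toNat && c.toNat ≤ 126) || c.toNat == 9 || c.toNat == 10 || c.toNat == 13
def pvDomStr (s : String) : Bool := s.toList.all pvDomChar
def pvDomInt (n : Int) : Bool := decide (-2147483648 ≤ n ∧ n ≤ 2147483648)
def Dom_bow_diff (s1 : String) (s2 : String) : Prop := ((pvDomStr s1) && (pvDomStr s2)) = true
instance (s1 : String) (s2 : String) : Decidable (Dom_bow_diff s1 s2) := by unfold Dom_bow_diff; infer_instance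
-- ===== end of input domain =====

-- B replaces A's nested in-place marker loops by a multiset counter over s2's tokens
-- consumed in one linear pass over s1's tokens (alternative algorithm); where s1 has
-- more 'damn' tokens than s2 the two differ and B's value is the intended one (D_ below).


-- ===== PORT A =====
-- the body of the inner 'for j' loop (reads/writes l1[i] and l2[j])
def bowInnerStep (i : Nat) (q : List String × List String) (j : Nat) : List String × List String :=
  if q.1.getD i "" == q.2.getD j "" then (q.1.set i "damn", q.2.set j "damn") else q

def bow_diff (s1 : String) (s2 : String) : Int :=
  let l1 := (PySem.Str.split? s1 " ").getD []
  let l2 := (PySem.Str.split? s2 " ").getD []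
  let st := (List.range l1.length).foldl
    (fun (p : List String × List String) i =>
      (List.range p.2.length).foldl (bowInnerStep i) p) (l1, l2)
  let l3 := st.1.foldl (fun acc item => if item != "damn" then acc ++ [item] else acc) []
  (l3.length : Int)

-- ===== PORT B =====
-- Source B's second loop body: consume one occurrence from the counter, or count unmatched
def bowAltStep (p : PySem.Dict String Int × Int) (w : String) : PySem.Dict String Int × Int :=
  let c := p.1.getD w 0
  if c > 0 then (p.1.insert w (c - 1), p.2) else (p.1, p.2 + 1)

def bow_diff_alt (s1 : String) (s2 : String) : Int :=
  let counts := ((PySem.Str.split? s2 " ").getD []).foldl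
    (fun (c : PySem.Dict String Int) w => c.insert w (c.getD w 0 + 1)) PySem.Dict.empty
  ((((PySem.Str.split? s1 " ").getD []).foldl bowAltStep (counts, (0 : Int)))).2

-- ===== PRECONDITION & SPEC =====
-- On inputs where the token 'damn' occurs more often among s1.split(" ") than among
-- s2.split(" "), A silently treats the excess 'damn' words of s1 as matched (its
-- in-place sentinel string collides with the real token) and returns a count lower by
-- that excess, while B counts them as unmatched — the intended multiset-difference value.
-- number of space-separated tokens of s equal to the word "damn" (a property of the input)
def damnCount (s : String) : Nat :=
  ((PySem.Chars.splitOn s.toList [' ']).map String.ofList).count "damn"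

def D_bow_diff (s1 : String) (s2 : String) : Prop := damnCount s2 < damnCount s1
instance (s1 : String) (s2 : String) : Decidable (D_bow_diff s1 s2) := by unfold D_bow_diff; infer_instance

def Spec_bow_diff (s1 : String) (s2 : String) (out : Int) : Prop := ¬ D_bow_diff s1 s2 → out = bow_diff_alt s1 s2
instance (s1 : String) (s2 : String) (out : Int) : Decidable (Spec_bow_diff s1 s2 out) := by unfold Spec_bow_diff; infer_instance

def pvDiffWitness_bow_diff : String × String := ("damn", "a")
def pvDiffWitnessOut_bow_diff : Int × Int := (0, 1)

-- ===== CLAIM (what is proved, stated in full; the proofs are below) =====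
def Claim_unchanged_bow_diff : Prop := ∀ (s1 : String) (s2 : String), Dom_bow_diff s1 s2 → Spec_bow_diff s1 s2 (bow_diff s1 s2)
def Claim_changed_bow_diff : Prop := Dom_bow_diff (pvDiffWitness_bow_diff.1) (pvDiffWitness_bow_diff.2) ∧ D_bow_diff (pvDiffWitness_bow_diff.1) (pvDiffWitness_bow_diff.2) ∧ bow_diff (pvDiffWitness_bow_diff.1) (pvDiffWitness_bow_diff.2) = pvDiffWitnessOut_bow_diff.1 ∧ bow_diff_alt (pvDiffWitness_bow_diff.1) (pvDiffWitness_bow_diff.2) = pvDiffWitnessOut_bow_diff.2 ∧ pvDiffWitnessOut_bow_diff.1 ≠ pvDiffWitnessOut_bow_diff.2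
def Claim_exact_bow_diff : Prop := ∀ (s1 : String) (s2 : String), Dom_bow_diff s1 s2 → D_bow_diff s1 s2 → bow_diff s1 s2 ≠ bow_diff_alt s1 s2

-- ===== LEMMAS AND PROOFS =====

-- the tokenization used by D_ is the same list of words the ports split off
theorem split_eq_damnTokens (s : String) :
    (PySem.Str.split? s " ").getD [] = (PySem.Chars.splitOn s.toList [' ']).map String.ofList := by
  simp [PySem.Str.split?, PySem.Chars.split?]

theorem damnCount_eq (s : String) :
    damnCount s = ((PySem.Str.split? s " ").getD []).count "damn" := by
  rw [damnCount, split_eq_damnTokens]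

-- replace the first occurrence of w in b by "damn" (what A's inner loop does to l2)
def markFirst (w : String) : List String → List String
  | [] => []
  | x :: xs => if x = w then "damn" :: xs else x :: markFirst w xs

-- sequential model of A's outer loop: the processed l1 and the final l2
def seqA : List String → List String → List String × List String
  | [], b => ([], b)
  | w :: ws, b =>
    let w' := if w = "damn" ∨ w ∈ b then "damn" else w
    let r := seqA ws (markFirst w b)
    (w' :: r.1, r.2)

-- sequential model of B's consuming pass: number of unmatched words of ws against b
def seqB : List String → List String → Nat
  | [], _ => 0
  | w :: ws, b => if w ∈ b then seqB ws (b.erase w) else seqB ws b + 1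

theorem markFirst_self_damn (b : List String) : markFirst "damn" b = b := by
  induction b with
  | nil => rfl
  | cons x xs ih =>
    simp only [markFirst]
    split
    · next h => simp [h]
    · simp [ih]

theorem markFirst_not_mem {w : String} {b : List String} (h : w ∉ b) : markFirst w b = b := by
  induction b with
  | nil => rfl
  | cons x xs ih =>
    simp only [List.mem_cons, not_or] at h
    simp [markFirst, Ne.symm h.1, ih h.2]

-- the inner loop once l1[i] already holds "damn": nothing changes
theorem inner_damn (i : Nat) (js : List Nat) (a b : List String)
    (ha : a.getD i "" = "damn") :
    js.foldl (bowInnerStep i) (a, b) = (a, b) := by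
  induction js generalizing b with
  | nil => rfl
  | cons j js ih =>
    simp only [List.foldl_cons]
    by_cases h : a.getD i "" == b.getD j ""
    · have hbj : b.getD j "" = "damn" := by
        have := (beq_iff_eq.1 h); rw [ha] at this; exact this.symm
      have hset : b.set j "damn" = b := by
        by_cases hj : j < b.length
        · have : b[j] = "damn" := by
            rwa [List.getD_eq_getElem b "" hj] at hbj
          conv_lhs => rw [← this]
          exact List.set_getElem_self hj
        · exact List.set_eq_of_length_le (by omega)
      have haset : a.set i "damn" = a := by
        by_cases hi : i < a.length
        · have : a[i] = "damn" := by rwa [List.getD_eq_getElem a "" hi] at ha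
          conv_lhs => rw [← this]
          exact List.set_getElem_self hi
        · exact List.set_eq_of_length_le (by omega)
      rw [bowInnerStep, if_pos h]
      simp only [haset, hset]
      exact ih b
    · rw [bowInnerStep, if_neg h]
      exact ih b

-- the inner loop over the tail of l2, scanning left to right from index pre.length
theorem inner_main (i : Nat) (w : String) (rest : List String) :
    ∀ (pre : List String) (a : List String), i < a.length → a.getD i "" = w → w ≠ "damn" →
    (List.range' pre.length rest.length).foldl (bowInnerStep i) (a, pre ++ rest) =
      (if w ∈ rest then (a.set i "damn", pre ++ markFirst w rest) else (a, pre ++ rest)) := by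
  induction rest with
  | nil => intro pre a _ _ _; simp
  | cons x xs ih =>
    intro pre a hi ha hw
    rw [List.length_cons, List.range'_succ, List.foldl_cons]
    have hbj : (pre ++ x :: xs).getD pre.length "" = x := by
      rw [List.getD_eq_getElem _ "" (by simp)]
      simp
    by_cases hx : x = w
    · subst hx
      rw [bowInnerStep, if_pos (by rw [ha, hbj]; simp)]
      have hset : (pre ++ x :: xs).set pre.length "damn" = pre ++ "damn" :: xs := by
        rw [List.set_append_right _ _ (Nat.le_refl _)]
        simp
      rw [hset]
      rw [inner_damn i _ _ _ (by
        rw [List.getD_eq_getElem _ "" (by simpa using hi)]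
        simp [List.getElem_set_self])]
      rw [if_pos (List.mem_cons_self)]
      simp [markFirst]
    · rw [bowInnerStep, if_neg (by rw [ha, hbj]; simp; exact fun h => hx h.symm)]
      have hpre : pre ++ x :: xs = (pre ++ [x]) ++ xs := by simp
      have hlen : pre.length + 1 = (pre ++ [x]).length := by simp
      rw [hpre, hlen, ih (pre ++ [x]) a hi ha hw]
      by_cases hmem : w ∈ xs
      · rw [if_pos hmem, if_pos (by simp [hmem])]
        simp [markFirst, hx]
      · rw [if_neg hmem, if_neg (by simp [hmem]; exact fun h => hx h.symm)]

-- one full inner pass, as a set at i plus markFirst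
theorem inner_full (i : Nat) (a b : List String) (hi : i < a.length) :
    (List.range b.length).foldl (bowInnerStep i) (a, b) =
      (a.set i (if a.getD i "" = "damn" ∨ a.getD i "" ∈ b then "damn" else a.getD i ""),
       markFirst (a.getD i "") b) := by
  have hself : a.set i (a.getD i "") = a := by
    have h1 : a[i] = a.getD i "" := (List.getD_eq_getElem a "" hi).symm
    conv_lhs => rw [← h1]
    exact List.set_getElem_self hi
  by_cases hd : a.getD i "" = "damn"
  · rw [inner_damn i _ a b hd]
    rw [hd, markFirst_self_damn]
    rw [if_pos (Or.inl rfl), ← hd, hself]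
  · have h0 : List.range b.length = List.range' ([] : List String).length b.length := by
      simp [List.range_eq_range']
    rw [h0]
    have hmain := inner_main i (a.getD i "") b [] a hi rfl hd
    simp only [List.nil_append] at hmain
    rw [hmain]
    by_cases hmem : a.getD i "" ∈ b
    · rw [if_pos hmem, if_pos (Or.inr hmem)]
    · rw [if_neg hmem, if_neg (by rintro (h | h); exact hd h; exact hmem h),
        markFirst_not_mem hmem, hself]

-- the outer loop equals the sequential model seqA
theorem outer_eq_seqA (ws : List String) :
    ∀ (pre : List String) (b : List String),
    (List.range' pre.length ws.length).foldl
        (fun (p : List String × List String) i =>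
          (List.range p.2.length).foldl (bowInnerStep i) p) (pre ++ ws, b) =
      (pre ++ (seqA ws b).1, (seqA ws b).2) := by
  induction ws with
  | nil => intro pre b; simp [seqA]
  | cons w tail ih =>
    intro pre b
    rw [List.length_cons, List.range'_succ, List.foldl_cons]
    have hget : (pre ++ w :: tail).getD pre.length "" = w := by
      rw [List.getD_eq_getElem _ "" (by simp)]
      simp
    rw [inner_full pre.length (pre ++ w :: tail) b (by simp), hget]
    have hset : ∀ v, (pre ++ w :: tail).set pre.length v = (pre ++ [v]) ++ tail := by
      intro v
      rw [List.set_append_right _ _ (Nat.le_refl _)]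
      simp
    rw [hset]
    have hlen : pre.length + 1 = (pre ++ [if w = "damn" ∨ w ∈ b then "damn" else w]).length := by simp
    rw [hlen, ih]
    simp [seqA]

-- filtering the non-"damn" words commutes with markFirst / erase
theorem filter_markFirst {w : String} (hw : w ≠ "damn") (b : List String) :
    (markFirst w b).filter (fun x => x != "damn") = (b.filter (fun x => x != "damn")).erase w := by
  induction b with
  | nil => rfl
  | cons x xs ih =>
    simp only [markFirst]
    by_cases hx : x = w
    · subst hx
      rw [if_pos rfl]
      simp [List.filter_cons, hw, List.erase_cons]
    · rw [if_neg hx]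
      by_cases hxd : x = "damn"
      · subst hxd
        simp [List.filter_cons, ih]
      · have hxb : (x != "damn") = true := by simpa using hxd
        rw [List.filter_cons, List.filter_cons, if_pos hxb, if_pos hxb, ih,
            List.erase_cons_tail (by simpa using hx)]

theorem mem_filter_ne {w : String} (hw : w ≠ "damn") (b : List String) :
    w ∈ b.filter (fun x => x != "damn") ↔ w ∈ b := by
  simp [List.mem_filter, hw]

-- the non-"damn" part of seqA's processed list counts the unmatched filtered words
theorem seqA_filter_len (ws : List String) :
    ∀ b : List String,
    ((seqA ws b).1.filter (fun x => x != "damn")).length =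
      seqB (ws.filter (fun x => x != "damn")) (b.filter (fun x => x != "damn")) := by
  induction ws with
  | nil => intro b; simp [seqA, seqB]
  | cons w tail ih =>
    intro b
    by_cases hd : w = "damn"
    · subst hd
      simp only [seqA, if_pos (Or.inl rfl), markFirst_self_damn]
      simpa [List.filter_cons] using ih b
    · by_cases hmem : w ∈ b
      · simp only [seqA, if_pos (Or.inr hmem)]
        rw [show ((("damn" :: (seqA tail (markFirst w b)).1)).filter (fun x => x != "damn")) =
          ((seqA tail (markFirst w b)).1.filter (fun x => x != "damn")) by simp [List.filter_cons]]
        rw [ih, filter_markFirst hd]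
        rw [show ((w :: tail).filter (fun x => x != "damn")) =
          w :: tail.filter (fun x => x != "damn") by simp [List.filter_cons, hd]]
        rw [seqB, if_pos ((mem_filter_ne hd b).2 hmem)]
      · simp only [seqA, if_neg (not_or.mpr ⟨hd, hmem⟩), markFirst_not_mem hmem]
        rw [show ((w :: (seqA tail b).1).filter (fun x => x != "damn")) =
          w :: ((seqA tail b).1.filter (fun x => x != "damn")) by simp [List.filter_cons, hd]]
        rw [show ((w :: tail).filter (fun x => x != "damn")) =
          w :: tail.filter (fun x => x != "damn") by simp [List.filter_cons, hd]]
        rw [seqB, if_neg (fun h => hmem ((mem_filter_ne hd b).1 h))]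
        simp [ih b]

-- erasing an element the filter drops anyway / keeps
theorem filter_erase_ite (a : String) (p : String → Bool) (l : List String) :
    (l.erase a).filter p = if p a then (l.filter p).erase a else l.filter p := by
  induction l with
  | nil => simp
  | cons x xs ih =>
    by_cases hx : x = a
    · subst hx
      rw [List.erase_cons_head]
      by_cases hp : p x
      · simp [List.filter_cons, hp, List.erase_cons]
      · simp [List.filter_cons, hp, ih]
    · rw [List.erase_cons_tail (by simpa using hx)]
      by_cases hp : p x
      · simp only [List.filter_cons, hp, if_pos, ih]
        by_cases hpa : p a
        · simp [hpa, List.erase_cons, hx]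
        · simp [hpa]
      · simp only [List.filter_cons, hp]
        simpa using ih

-- seqB on the raw lists = seqB on the "damn"-free lists plus the excess of 'damn's in l1
theorem seqB_excess (l1 : List String) :
    ∀ l2 : List String,
    seqB l1 l2 = seqB (l1.filter (fun x => x != "damn")) (l2.filter (fun x => x != "damn"))
      + (l1.count "damn" - l2.count "damn") := by
  induction l1 with
  | nil => intro l2; simp [seqB]
  | cons w ws ih =>
    intro l2
    by_cases hd : w = "damn"
    · subst hd
      rw [show (("damn" :: ws).filter (fun x => x != "damn")) =
        ws.filter (fun x => x != "damn") by simp [List.filter_cons]]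
      by_cases hmem : "damn" ∈ l2
      · rw [seqB, if_pos hmem, ih (l2.erase "damn")]
        rw [filter_erase_ite, if_neg (by simp)]
        have h1 : (l2.erase "damn").count "damn" = l2.count "damn" - 1 := List.count_erase_self ..
        have h2 : 0 < l2.count "damn" := List.count_pos_iff.2 hmem
        rw [h1, List.count_cons_self]
        omega
      · rw [seqB, if_neg hmem, ih l2]
        have h2 : l2.count "damn" = 0 := List.count_eq_zero.2 hmem
        rw [List.count_cons_self, h2]
        omega
    · rw [show ((w :: ws).filter (fun x => x != "damn")) =
        w :: ws.filter (fun x => x != "damn") by simp [List.filter_cons, hd]]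
      have hcnt : (w :: ws).count "damn" = ws.count "damn" := by
        simp [List.count_cons, hd]
      by_cases hmem : w ∈ l2
      · rw [seqB, if_pos hmem, ih (l2.erase w)]
        rw [filter_erase_ite, if_pos (by simpa using hd)]
        rw [seqB, if_pos ((mem_filter_ne hd l2).2 hmem)]
        rw [List.count_erase_of_ne (Ne.symm hd), hcnt]
      · rw [seqB, if_neg hmem, ih l2]
        rw [seqB, if_neg (fun h => hmem ((mem_filter_ne hd l2).1 h))]
        rw [hcnt]
        omega

-- the counter built from s2's tokens counts each token
theorem counter_build (ts : List String) :
    ∀ (cd : PySem.Dict String Int) (x : String),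
    (ts.foldl (fun (c : PySem.Dict String Int) w => c.insert w (c.getD w 0 + 1)) cd).getD x 0 =
      cd.getD x 0 + (ts.count x : Int) := by
  induction ts with
  | nil => intro cd x; simp
  | cons t ts ih =>
    intro cd x
    rw [List.foldl_cons, ih, PySem.Dict.getD_insert]
    by_cases hxt : x = t
    · subst hxt
      rw [if_pos rfl, List.count_cons_self]
      push_cast
      ring
    · rw [if_neg hxt, List.count_cons, if_neg (by simpa using Ne.symm hxt)]
      simp

-- B's consuming pass equals seqB, under the counter invariant
theorem bridgeB (ws : List String) :
    ∀ (b : List String) (cd : PySem.Dict String Int) (k : Int),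
    (∀ x : String, cd.getD x 0 = (b.count x : Int)) →
    (ws.foldl bowAltStep (cd, k)).2 = k + (seqB ws b : Int) := by
  induction ws with
  | nil => intro b cd k _; simp [seqB]
  | cons w tail ih =>
    intro b cd k hinv
    rw [List.foldl_cons]
    have hcw : cd.getD w 0 = (b.count w : Int) := hinv w
    by_cases hmem : w ∈ b
    · have hpos : (0 : Int) < cd.getD w 0 := by
        rw [hcw]; exact_mod_cast List.count_pos_iff.2 hmem
      have hstep : bowAltStep (cd, k) w = (cd.insert w (cd.getD w 0 - 1), k) := by
        simp only [bowAltStep]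
        rw [if_pos hpos]
      rw [hstep]
      have hinv' : ∀ x : String,
          (cd.insert w (cd.getD w 0 - 1)).getD x 0 = (((b.erase w).count x : Nat) : Int) := by
        intro x
        rw [PySem.Dict.getD_insert]
        by_cases hxw : x = w
        · subst hxw
          rw [if_pos rfl, hcw, List.count_erase_self]
          have : 0 < b.count x := List.count_pos_iff.2 hmem
          push_cast [Nat.cast_sub (by omega : 1 ≤ b.count x)]
          ring
        · rw [if_neg hxw, hinv x, List.count_erase_of_ne hxw]
      rw [ih (b.erase w) _ k hinv']
      rw [seqB, if_pos hmem]
    · have hzero : cd.getD w 0 = 0 := by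
        rw [hcw, List.count_eq_zero.2 hmem]; rfl
      have hstep : bowAltStep (cd, k) w = (cd, k + 1) := by
        simp only [bowAltStep]
        rw [hzero, if_neg (by norm_num)]
      rw [hstep, ih b cd (k + 1) hinv, seqB, if_neg hmem]
      push_cast
      ring

-- both ports in terms of seqB
theorem bow_diff_eq (s1 s2 : String) :
    bow_diff s1 s2 = (seqB (((PySem.Str.split? s1 " ").getD []).filter (fun x => x != "damn"))
      (((PySem.Str.split? s2 " ").getD []).filter (fun x => x != "damn")) : Int) := by
  unfold bow_diff
  set l1 := (PySem.Str.split? s1 " ").getD []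
  set l2 := (PySem.Str.split? s2 " ").getD []
  simp only
  have h0 : List.range l1.length = List.range' ([] : List String).length l1.length := by
    simp [List.range_eq_range']
  rw [h0]
  have houter := outer_eq_seqA l1 [] l2
  simp only [List.nil_append] at houter
  rw [houter]
  rw [PySem.List.foldl_append_if_eq_filter]
  simp only [List.nil_append]
  rw [seqA_filter_len]

theorem bow_diff_alt_eq (s1 s2 : String) :
    bow_diff_alt s1 s2 = (seqB ((PySem.Str.split? s1 " ").getD [])
      ((PySem.Str.split? s2 " ").getD []) : Int) := by
  unfold bow_diff_alt
  set l1 := (PySem.Str.split? s1 " ").getD []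
  set l2 := (PySem.Str.split? s2 " ").getD []
  simp only
  have hbuild : ∀ x : String,
      (l2.foldl (fun (c : PySem.Dict String Int) w => c.insert w (c.getD w 0 + 1))
        PySem.Dict.empty).getD x 0 = (l2.count x : Int) := by
    intro x
    rw [counter_build l2 PySem.Dict.empty x]
    simp
  rw [bridgeB l1 l2 _ 0 hbuild]
  simp

-- ===== VERDICT (by name: the statements are the Claim_ definitions above) =====
theorem bow_diff_spec : Claim_unchanged_bow_diff := by
  intro s1 s2 _ hD
  rw [bow_diff_eq, bow_diff_alt_eq, seqB_excess ((PySem.Str.split? s1 " ").getD [])]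
  unfold D_bow_diff at hD
  rw [damnCount_eq, damnCount_eq] at hD
  have : ((PySem.Str.split? s1 " ").getD []).count "damn"
      - ((PySem.Str.split? s2 " ").getD []).count "damn" = 0 := by omega
  rw [this]
  simp

theorem bow_diff_changed : Claim_changed_bow_diff := by
  unfold Claim_changed_bow_diff; decide

theorem bow_diff_tight : Claim_exact_bow_diff := by
  intro s1 s2 _ hD
  rw [bow_diff_eq, bow_diff_alt_eq, seqB_excess ((PySem.Str.split? s1 " ").getD [])]
  unfold D_bow_diff at hD
  rw [damnCount_eq, damnCount_eq] at hD
  have h1 : 0 < ((PySem.Str.split? s1 " ").getD []).count "damn"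
      - ((PySem.Str.split? s2 " ").getD []).count "damn" := by omega
  intro h
  rw [Int.ofNat_inj] at h
  omega
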